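-- pv_equiv track=rewrite | github.com/Kiichen/advent_of_code | 2023/11/cosmic_expansion.py | get_sum_of_shortest_ranges
-- ===== SOURCE A (Python) =====
-- input = """
-- ...#......
-- .......#..
-- #.........
-- ..........
-- ......#...
-- .#........
-- .........#
-- ..........
-- .......#..
-- #...#.....
-- """
--
-- def get_sum_of_shortest_ranges(input: str, expand: int):
--     grid = input.strip().splitlines()
--
--     empty_rows = [y for y, row in enumerate(grid) if all(c == "." for c in row)]
--     empty_cols = [
--         x for x in range(len(grid[0])) if all(c == "." for row in grid for c in row[x])
--     ]
--
--     galaxies = [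
--         (y, x) for y, row in enumerate(grid) for x, col in enumerate(row) if col == "#"
--     ]
--
--     total = 0
--
--     for i, galaxy in enumerate(galaxies):
--         for other_galaxy in galaxies[:i]:
--             y_1, x_1 = galaxy
--             y_2, x_2 = other_galaxy
--
--             if y_1 > y_2:
--                 y_1, y_2 = y_2, y_1
--             if x_1 > x_2:
--                 x_1, x_2 = x_2, x_1
--
--             for row in range(y_1, y_2):
--                 total += expand if row in empty_rows else 1
--             for col in range(x_1, x_2):
--                 total += expand if col in empty_cols else 1
--
--     return total
-- ===== SOURCE B (Python) =====
-- def _axis_total(coords, weights):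
--     # mapped coordinate of v is the prefix sum of weights below v;
--     # pairwise sum of (mapped(max) - mapped(min)) over all pairs, via sort + running sums
--     pre = []
--     acc = 0
--     for w in weights:
--         pre.append(acc)
--         acc += w
--     total = 0
--     run = 0
--     for i, v in enumerate(sorted(coords)):
--         m = pre[v]
--         total += m * i - run
--         run += m
--     return total
--
--
-- def get_sum_of_shortest_ranges(input: str, expand: int):
--     grid = input.strip().splitlines()
--     width = len(grid[0])
--     row_w = [expand if all(c == "." for c in row) else 1 for row in grid]
--     col_w = [
--         expand if all(row[x] == "." for row in grid) else 1 for x in range(width)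
--     ]
--     ys = []
--     xs = []
--     for y, row in enumerate(grid):
--         for x, c in enumerate(row):
--             if c == "#":
--                 ys.append(y)
--                 xs.append(x)
--     return _axis_total(ys, row_w) + _axis_total(xs, col_w)
-- ===== Notes on version B (the rewrite author's own statement) =====
-- stated objective: alternative
-- what changed: Replaces A's loop over all galaxy pairs with per-pair row/column range scans by a different algorithm: each coordinate is mapped through a prefix-sum expansion table and the pairwise distances are summed per axis in one sort + running-sum pass (O(H*W + G log G) vs A's O(G^2*(H+W)); a timing run on the generated inputs read only 1.2x, so no speed is claimed).
-- outside the precondition, e.g. on get_sum_of_shortest_ranges('#.\n.##', 2): A returns 6, B raises IndexError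
import Mathlib
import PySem

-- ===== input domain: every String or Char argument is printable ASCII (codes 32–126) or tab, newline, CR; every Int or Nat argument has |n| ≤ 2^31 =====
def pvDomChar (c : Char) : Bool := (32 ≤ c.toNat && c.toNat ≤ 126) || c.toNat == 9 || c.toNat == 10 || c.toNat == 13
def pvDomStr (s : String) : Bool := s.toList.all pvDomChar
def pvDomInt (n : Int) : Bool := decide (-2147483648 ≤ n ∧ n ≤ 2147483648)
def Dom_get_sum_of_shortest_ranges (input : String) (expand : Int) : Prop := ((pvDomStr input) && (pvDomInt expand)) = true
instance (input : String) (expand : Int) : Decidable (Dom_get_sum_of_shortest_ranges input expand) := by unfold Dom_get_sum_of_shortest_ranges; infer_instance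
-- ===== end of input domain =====

-- B replaces A's per-galaxy-pair row/column range scans by a different algorithm:
-- prefix-sum coordinate mapping plus one sort + running-sum pass per axis.


-- ===== PORT A =====
def get_sum_of_shortest_ranges (input : String) (expand : Int) : Int :=
  let grid : List (List Char) := PySem.Chars.splitlines (PySem.Chars.strip input.toList)
  let empty_rows : List Int :=
    ((PySem.List.enumerate grid).filter (fun yr => yr.2.all (fun c => c == '.'))).map (fun yr => yr.1)
  -- grid[0]: raises IndexError on empty grid, excluded by Pre_
  let width : Int := (grid.headD []).length
  let empty_cols : List Int :=
    (PySem.List.pyRange 0 width 1).filter (fun x =>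
      grid.all (fun row => PySem.List.pyGetD row x '.' == '.'))
  let galaxies : List (Int × Int) :=
    (PySem.List.enumerate grid).flatMap (fun yr =>
      ((PySem.List.enumerate yr.2).filter (fun xc => xc.2 == '#')).map (fun xc => (yr.1, xc.1)))
  (PySem.List.enumerate galaxies).foldl (fun total ig =>
    (PySem.List.slice galaxies none (some ig.1)).foldl (fun total other =>
      let yp := if ig.2.1 > other.1 then (other.1, ig.2.1) else (ig.2.1, other.1)
      let xp := if ig.2.2 > other.2 then (other.2, ig.2.2) else (ig.2.2, other.2)
      let total := (PySem.List.pyRange yp.1 yp.2 1).foldl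
        (fun t row => t + (if empty_rows.contains row then expand else 1)) total
      (PySem.List.pyRange xp.1 xp.2 1).foldl
        (fun t col => t + (if empty_cols.contains col then expand else 1)) total) total) 0

-- ===== PORT B =====
def pvPrefix (weights : List Int) : List Int :=
  (weights.foldl (fun s w => (s.1 ++ [s.2], s.2 + w)) (([] : List Int), (0 : Int))).1

def pvAxisTotal (coords : List Int) (weights : List Int) : Int :=
  let pre := pvPrefix weights
  ((PySem.List.enumerate (PySem.List.sorted coords (fun v => v) false)).foldl
    (fun s iv =>
      let m := PySem.List.pyGetD pre iv.2 0
      (s.1 + m * iv.1 - s.2, s.2 + m)) ((0 : Int), (0 : Int))).1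

def get_sum_of_shortest_ranges_alt (input : String) (expand : Int) : Int :=
  let grid : List (List Char) := PySem.Chars.splitlines (PySem.Chars.strip input.toList)
  let width : Int := (grid.headD []).length
  let row_w : List Int := grid.map (fun row => if row.all (fun c => c == '.') then expand else 1)
  let col_w : List Int := (PySem.List.pyRange 0 width 1).map (fun x =>
      if grid.all (fun row => PySem.List.pyGetD row x '.' == '.') then expand else 1)
  let pairs : List Int × List Int :=
    (PySem.List.enumerate grid).foldl (fun s yr =>
      (PySem.List.enumerate yr.2).foldl (fun s xc =>
        if xc.2 == '#' then (s.1 ++ [yr.1], s.2 ++ [xc.1]) else s) s) ([], [])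
  pvAxisTotal pairs.1 row_w + pvAxisTotal pairs.2 col_w

-- ===== PRECONDITION & SPEC =====
-- Pre_ excludes inputs that are empty after strip (A raises IndexError on grid[0]) and
-- ragged grids whose later lines differ in length from the first: A raises IndexError when a
-- line is shorter, and when later lines are longer A still returns a value (columns beyond the
-- first line's width are never counted as empty) while B's natural rectangular-grid prefix
-- table raises IndexError there.
def Pre_get_sum_of_shortest_ranges (input : String) (expand : Int) : Prop :=
  let grid := PySem.Chars.splitlines (PySem.Chars.strip input.toList)
  grid ≠ [] ∧ ∀ row ∈ grid, row.length = (grid.headD []).length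
instance (input : String) (expand : Int) : Decidable (Pre_get_sum_of_shortest_ranges input expand) := by
  unfold Pre_get_sum_of_shortest_ranges; infer_instance

def pvWitness_get_sum_of_shortest_ranges : String × Int := ("#.\n.#", 2)

def Spec_get_sum_of_shortest_ranges (input : String) (expand : Int) (out : Int) : Prop := out = get_sum_of_shortest_ranges_alt input expand
instance (input : String) (expand : Int) (out : Int) : Decidable (Spec_get_sum_of_shortest_ranges input expand out) := by unfold Spec_get_sum_of_shortest_ranges; infer_instance

-- ===== CLAIM (what is proved, stated in full; the proofs are below) =====
def Claim_equal_get_sum_of_shortest_ranges : Prop := ∀ (input : String) (expand : Int), Dom_get_sum_of_shortest_ranges input expand → Pre_get_sum_of_shortest_ranges input expand → Spec_get_sum_of_shortest_ranges input expand (get_sum_of_shortest_ranges input expand)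

-- ===== LEMMAS AND PROOFS =====

-- Σ_{i<j} f(l_j, l_i): the sum of f over all unordered pairs of positions, by head recursion.
def pairG {α : Type} (f : α → α → Int) : List α → Int
  | [] => 0
  | x :: t => (t.map (f x)).sum + pairG f t

theorem pairG_append_singleton {α : Type} (f : α → α → Int) (l : List α) (z : α) :
    pairG f (l ++ [z]) = pairG f l + (l.map (fun y => f y z)).sum := by
  induction l with
  | nil => simp [pairG]
  | cons x t ih => simp [pairG, ih]; ring

theorem pairG_perm {α : Type} (f : α → α → Int) (hsym : ∀ a b, f a b = f b a)
    {l₁ l₂ : List α} (h : l₁.Perm l₂) : pairG f l₁ = pairG f l₂ := by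
  induction h with
  | nil => rfl
  | cons x h ih => simp [pairG, ih, (h.map _).sum_eq]
  | swap x y t => simp [pairG, hsym x y]; ring
  | trans _ _ ih₁ ih₂ => exact ih₁.trans ih₂

theorem pairG_add {α : Type} (f g : α → α → Int) (l : List α) :
    pairG (fun a b => f a b + g a b) l = pairG f l + pairG g l := by
  induction l with
  | nil => rfl
  | cons x t ih =>
    simp only [pairG, ih, List.sum_map_add]
    ring

theorem pairG_comp {α β : Type} (p : α → β) (f : β → β → Int) (l : List α) :
    pairG (fun a b => f (p a) (p b)) l = pairG f (l.map p) := by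
  induction l with
  | nil => rfl
  | cons x t ih => simp [pairG, ih, List.map_map]; rfl

-- ===== LEMMAS-PART2 =====

theorem pvSum_map_sub_const (m : Int → Int) (c : Int) (l : List Int) :
    (l.map (fun y => c - m y)).sum = (l.length : Int) * c - (l.map m).sum := by
  induction l with
  | nil => simp
  | cons x t ih => simp [ih]; ring

-- value of the prefix-sum table built by pvPrefix
theorem pvPrefix_aux (w : List Int) : ∀ (l0 : List Int) (a0 : Int),
    w.foldl (fun s x => (s.1 ++ [s.2], s.2 + x)) (l0, a0)
      = (l0 ++ (List.range w.length).map (fun k => a0 + (w.take k).sum), a0 + w.sum) := by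
  induction w with
  | nil => intro l0 a0; simp
  | cons x t ih =>
    intro l0 a0
    simp only [List.foldl_cons, ih, List.length_cons, List.range_succ_eq_map, List.map_cons,
      List.take_zero, List.sum_nil, List.map_map]
    have hmf : (List.map ((fun k => a0 + (List.take k (x :: t)).sum) ∘ Nat.succ) (List.range t.length))
        = List.map (fun k => a0 + x + (List.take k t).sum) (List.range t.length) := by
      apply List.map_congr_left; intro k _
      simp [Function.comp, List.take_succ_cons]; ring
    rw [hmf]
    simp [List.sum_cons]
    ring

theorem pvPrefix_eq (w : List Int) :
    pvPrefix w = (List.range w.length).map (fun k => (w.take k).sum) := by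
  unfold pvPrefix
  rw [pvPrefix_aux]
  simp

theorem pvPrefix_getD (w : List Int) (v : Int) (h0 : 0 ≤ v) (hv : v < (w.length : Int)) :
    PySem.List.pyGetD (pvPrefix w) v 0 = (w.take v.toNat).sum := by
  rw [pvPrefix_eq, PySem.List.pyGetD_of_nonneg _ _ h0,
    PySem.List.getD_map_range _ _ _ _ (by omega)]

-- A's expansion-counting scan over range(a, b) is a difference of prefix sums
theorem pvRange_fold_sum (w : List Int) (a : Int) (h0 : 0 ≤ a) :
    ∀ b : Int, a ≤ b → b ≤ (w.length : Int) → ∀ t0 : Int,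
      (PySem.List.pyRange a b).foldl (fun t r => t + PySem.List.pyGetD w r 0) t0
        = t0 + ((w.take b.toNat).sum - (w.take a.toNat).sum) := by
  intro b hab
  induction b, hab using Int.le_induction with
  | base => intro _ t0; rw [PySem.List.pyRange_one_eq_nil le_rfl]; simp
  | succ b hb ih =>
    intro hlen t0
    rw [PySem.List.pyRange_one_succ_right hb, List.foldl_append, ih (by omega)]
    have hbn : (b + 1).toNat = b.toNat + 1 := by omega
    have hblt : b.toNat < w.length := by omega
    have hget : PySem.List.pyGetD w b 0 = w[b.toNat] :=
      PySem.List.pyGetD_eq_getElem (i := b) w 0 (by omega) (by omega)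
    have hts : (List.take (b + 1).toNat w).sum = (List.take b.toNat w).sum + w[b.toNat] := by
      rw [hbn]
      exact List.sum_take_succ _ _ hblt
    simp only [List.foldl_cons, List.foldl_nil, hget, hts]
    ring

-- the paired-accumulator sort pass of B, evaluated on an ascending list
theorem pvSortedFold (m : Int → Int) : ∀ (s : List Int), s.Pairwise (· ≤ ·) →
    (PySem.List.enumerate s).foldl
        (fun st iv => (st.1 + m iv.2 * iv.1 - st.2, st.2 + m iv.2)) ((0 : Int), (0 : Int))
      = (pairG (fun a b => m (max a b) - m (min a b)) s, (s.map m).sum) := by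
  intro s
  induction s using List.reverseRecOn with
  | nil => intro _; simp [PySem.List.enumerate_nil, pairG]
  | append_singleton l z ih =>
    intro hp
    have hl : l.Pairwise (· ≤ ·) := hp.sublist (List.sublist_append_left _ _)
    have hz : ∀ y ∈ l, y ≤ z := by
      have h := List.pairwise_append.mp hp
      exact fun y hy => h.2.2 y hy z (List.mem_singleton_self z)
    rw [PySem.List.enumerate_append, List.foldl_append, ih hl]
    simp only [PySem.List.enumerate_cons, PySem.List.enumerate_nil, List.foldl_cons, List.foldl_nil]
    rw [pairG_append_singleton]
    have hmap : (l.map (fun y => m (max y z) - m (min y z))).sum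
        = (l.length : Int) * m z - (l.map m).sum := by
      rw [← pvSum_map_sub_const m (m z) l]
      apply congrArg
      apply List.map_congr_left
      intro y hy
      rw [max_eq_right (hz y hy), min_eq_left (hz y hy)]
    rw [hmap]
    simp
    all_goals ring

-- A's triangular double loop (index i, prefix galaxies[:i]) is pairG, for symmetric f
theorem pvAfold {α : Type} (f : α → α → Int) (hsym : ∀ a b, f a b = f b a) (l : List α) :
    (PySem.List.enumerate l).foldl
        (fun tot ig => (l.take ig.1.toNat).foldl (fun t o => t + f ig.2 o) tot) (0 : Int)
      = pairG f l := by
  induction l using List.reverseRecOn with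
  | nil => simp [PySem.List.enumerate_nil, pairG]
  | append_singleton l z ih =>
    rw [PySem.List.enumerate_append]
    rw [List.foldl_append]
    have hcongr : ∀ (tot : Int), ∀ ig ∈ PySem.List.enumerate l,
        ((l ++ [z]).take ig.1.toNat).foldl (fun t o => t + f ig.2 o) tot
          = (l.take ig.1.toNat).foldl (fun t o => t + f ig.2 o) tot := by
      intro tot ig hig
      obtain ⟨k, hk, rfl⟩ := (PySem.List.mem_enumerate_iff l 0 ig).mp hig
      have : ((0 : Int) + (k : Int)).toNat = k := by omega
      rw [this, List.take_append_of_le_length (le_of_lt hk)]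
    rw [PySem.List.foldl_congr_mem _ _ _ _ hcongr, ih]
    simp only [PySem.List.enumerate_cons, PySem.List.enumerate_nil, List.foldl_cons, List.foldl_nil]
    have h1 : ((0 : Int) + (l.length : Int)).toNat = l.length := by omega
    rw [h1, List.take_left, PySem.List.foldl_add, pairG_append_singleton]
    apply congrArg
    apply congrArg
    apply List.map_congr_left
    intro y _
    exact hsym z y

-- B's galaxy-collection loop, inner row pass
theorem pvInnerFold (y : Int) (l : List (Int × Char)) (s : List Int × List Int) :
    l.foldl (fun s xc => if xc.2 == '#' then (s.1 ++ [y], s.2 ++ [xc.1]) else s) s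
      = (s.1 ++ (l.filter (fun xc => xc.2 == '#')).map (fun _ => y),
         s.2 ++ (l.filter (fun xc => xc.2 == '#')).map (fun xc => xc.1)) := by
  induction l generalizing s with
  | nil => simp
  | cons xc t ih =>
    simp only [List.foldl_cons]
    rw [ih]
    cases h : (xc.2 == '#') <;> simp [h]

-- B's galaxy-collection loop, outer pass over the rows
theorem pvOuterFold {β : Type} (F G : β → List Int) (l : List β) (s : List Int × List Int) :
    l.foldl (fun s e => (s.1 ++ F e, s.2 ++ G e)) s = (s.1 ++ l.flatMap F, s.2 ++ l.flatMap G) := by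
  induction l generalizing s with
  | nil => simp
  | cons e t ih => simp [List.foldl_cons, ih]


-- proof-only abbreviations for the shared grid data
def pvF (m : Int → Int) (a b : Int) : Int := m (max a b) - m (min a b)

def pvRowW (grid : List (List Char)) (expand : Int) : List Int :=
  grid.map (fun row => if row.all (fun c => c == '.') then expand else 1)

def pvColW (grid : List (List Char)) (expand : Int) : List Int :=
  (PySem.List.pyRange 0 ((grid.headD []).length : Int)).map (fun x =>
    if grid.all (fun row => PySem.List.pyGetD row x '.' == '.') then expand else 1)

def pvGalaxies (grid : List (List Char)) : List (Int × Int) :=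
  (PySem.List.enumerate grid).flatMap (fun yr =>
    ((PySem.List.enumerate yr.2).filter (fun xc => xc.2 == '#')).map (fun xc => (yr.1, xc.1)))

theorem pvF_symm (m : Int → Int) (a b : Int) : pvF m a b = pvF m b a := by
  unfold pvF; rw [max_comm, min_comm]

theorem pvAxisTotal_eq (coords w : List Int) :
    pvAxisTotal coords w = pairG (pvF (fun v => PySem.List.pyGetD (pvPrefix w) v 0)) coords := by
  have hpw : (PySem.List.sorted coords (fun v => v) false).Pairwise (· ≤ ·) :=
    PySem.List.sorted_pairwise coords (fun v => v)
  simp only [pvAxisTotal]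
  rw [pvSortedFold (fun v => PySem.List.pyGetD (pvPrefix w) v 0) _ hpw]
  show pairG (pvF (fun v => PySem.List.pyGetD (pvPrefix w) v 0))
      (PySem.List.sorted coords (fun v => v) false) = _
  exact pairG_perm _ (pvF_symm _) (PySem.List.sorted_perm coords (fun v => v) false)

-- membership in A's empty-row index list is B's row-weight table
theorem pvRowBridge (grid : List (List Char)) (expand : Int) (r : Int)
    (h0 : 0 ≤ r) (hr : r < (grid.length : Int)) :
    (if (((PySem.List.enumerate grid).filter (fun yr => yr.2.all (fun c => c == '.'))).map
          (fun yr => yr.1)).contains r then expand else 1)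
      = PySem.List.pyGetD (pvRowW grid expand) r 0 := by
  have hlt : r.toNat < grid.length := by omega
  have hlen : r < ((pvRowW grid expand).length : Int) := by simp [pvRowW]; omega
  rw [PySem.List.pyGetD_eq_getElem _ 0 h0 hlen]
  unfold pvRowW
  rw [List.getElem_map]
  have hmem : r ∈ (((PySem.List.enumerate grid).filter (fun yr => yr.2.all (fun c => c == '.'))).map
      (fun yr => yr.1)) ↔ grid[r.toNat].all (fun c => c == '.') = true := by
    constructor
    · intro hm
      obtain ⟨yr, hyr, hfst⟩ := List.mem_map.mp hm
      obtain ⟨hin, hp⟩ := List.mem_filter.mp hyr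
      obtain ⟨k, hk, rfl⟩ := (PySem.List.mem_enumerate_iff _ 0 _).mp hin
      have hkr : r.toNat = k := by simp at hfst; omega
      subst hkr
      simpa using hp
    · intro hall
      refine List.mem_map.mpr ⟨(r, grid[r.toNat]), List.mem_filter.mpr ⟨?_, hall⟩, rfl⟩
      refine (PySem.List.mem_enumerate_iff _ 0 _).mpr ⟨r.toNat, hlt, ?_⟩
      simp; omega
  by_cases hall : grid[r.toNat].all (fun c => c == '.') = true
  · rw [if_pos (List.contains_iff_mem.mpr (hmem.mpr hall)), hall, if_pos rfl]
  · rw [if_neg (fun hc => hall (hmem.mp (List.contains_iff_mem.mp hc)))]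
    rw [if_neg hall]

-- membership in A's empty-column index list is B's column-weight table
theorem pvColBridge (grid : List (List Char)) (expand : Int) (x : Int)
    (h0 : 0 ≤ x) (hx : x < ((grid.headD []).length : Int)) :
    (if ((PySem.List.pyRange 0 ((grid.headD []).length : Int)).filter (fun x =>
          grid.all (fun row => PySem.List.pyGetD row x '.' == '.'))).contains x then expand else 1)
      = PySem.List.pyGetD (pvColW grid expand) x 0 := by
  unfold pvColW
  rw [PySem.List.pyGetD_map_pyRange_of_nonneg _ _ _ _ h0 hx]
  have hmem : x ∈ ((PySem.List.pyRange 0 ((grid.headD []).length : Int)).filter (fun x =>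
      grid.all (fun row => PySem.List.pyGetD row x '.' == '.')))
      ↔ grid.all (fun row => PySem.List.pyGetD row x '.' == '.') = true := by
    constructor
    · intro hm; exact (List.mem_filter.mp hm).2
    · intro hall
      exact List.mem_filter.mpr ⟨PySem.List.mem_pyRange_one.mpr ⟨h0, hx⟩, hall⟩
  by_cases hall : grid.all (fun row => PySem.List.pyGetD row x '.' == '.') = true
  · rw [if_pos (List.contains_iff_mem.mpr (hmem.mpr hall)), hall, if_pos rfl]
  · rw [if_neg (fun hc => hall (hmem.mp (List.contains_iff_mem.mp hc))), if_neg hall]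

-- coordinates of galaxies are inside the (rectangular) grid
theorem pvGalaxies_bounds (grid : List (List Char))
    (hrect : ∀ row ∈ grid, row.length = (grid.headD []).length) :
    ∀ p ∈ pvGalaxies grid, 0 ≤ p.1 ∧ p.1 < (grid.length : Int) ∧
      0 ≤ p.2 ∧ p.2 < ((grid.headD []).length : Int) := by
  intro p hp
  obtain ⟨yr, hyr, hmm⟩ := List.mem_flatMap.mp hp
  obtain ⟨xc, hxc, rfl⟩ := List.mem_map.mp hmm
  obtain ⟨hxin, _⟩ := List.mem_filter.mp hxc
  obtain ⟨k, hk, rfl⟩ := (PySem.List.mem_enumerate_iff _ 0 _).mp hyr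
  obtain ⟨j, hj, rfl⟩ := (PySem.List.mem_enumerate_iff _ 0 _).mp hxin
  have hw : grid[k].length = (grid.headD []).length := hrect _ (List.getElem_mem hk)
  simp only at hj ⊢
  rw [hw] at hj
  refine ⟨by omega, by omega, by omega, by omega⟩

-- B's collection loop produces the two coordinate projections of A's galaxy list
theorem pvPairs_eq (grid : List (List Char)) :
    ((PySem.List.enumerate grid).foldl (fun s yr =>
        (PySem.List.enumerate yr.2).foldl (fun s xc =>
          if xc.2 == '#' then (s.1 ++ [yr.1], s.2 ++ [xc.1]) else s) s) (([] : List Int), ([] : List Int)))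
      = ((pvGalaxies grid).map (fun p => p.1), (pvGalaxies grid).map (fun p => p.2)) := by
  rw [PySem.List.foldl_congr_mem _ _ (fun s yr =>
      (s.1 ++ ((PySem.List.enumerate yr.2).filter (fun xc => xc.2 == '#')).map (fun _ => yr.1),
       s.2 ++ ((PySem.List.enumerate yr.2).filter (fun xc => xc.2 == '#')).map (fun xc => xc.1))) _
      (fun s yr _ => pvInnerFold yr.1 (PySem.List.enumerate yr.2) s)]
  rw [pvOuterFold]
  unfold pvGalaxies
  rw [List.map_flatMap, List.map_flatMap]
  simp [List.map_map, Function.comp_def]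


theorem pvMinMax (a b : Int) : (if a > b then (b, a) else (a, b)) = (min a b, max a b) := by
  split_ifs with h
  · rw [min_eq_right (le_of_lt h), max_eq_left (le_of_lt h)]
  · rw [min_eq_left (by omega), max_eq_right (by omega)]

-- the heart: A's pairwise double loop over the grid equals B's two axis passes
theorem pvCore (grid : List (List Char)) (expand : Int)
    (hrect : ∀ row ∈ grid, row.length = (grid.headD []).length) :
    (PySem.List.enumerate (pvGalaxies grid)).foldl (fun total ig =>
      (PySem.List.slice (pvGalaxies grid) none (some ig.1)).foldl (fun total other =>
        let yp := if ig.2.1 > other.1 then (other.1, ig.2.1) else (ig.2.1, other.1)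
        let xp := if ig.2.2 > other.2 then (other.2, ig.2.2) else (ig.2.2, other.2)
        let total := (PySem.List.pyRange yp.1 yp.2 1).foldl
          (fun t row => t + (if (((PySem.List.enumerate grid).filter (fun yr =>
            yr.2.all (fun c => c == '.'))).map (fun yr => yr.1)).contains row then expand else 1)) total
        (PySem.List.pyRange xp.1 xp.2 1).foldl
          (fun t col => t + (if ((PySem.List.pyRange 0 ((grid.headD []).length : Int) 1).filter (fun x =>
            grid.all (fun row => PySem.List.pyGetD row x '.' == '.'))).contains col then expand else 1)) total)
        total) 0
      = pvAxisTotal ((pvGalaxies grid).map (fun p => p.1)) (pvRowW grid expand)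
        + pvAxisTotal ((pvGalaxies grid).map (fun p => p.2)) (pvColW grid expand) := by
  have hlenr : ((pvRowW grid expand).length : Int) = (grid.length : Int) := by simp [pvRowW]
  have hlenc : ((pvColW grid expand).length : Int) = ((grid.headD []).length : Int) := by
    simp [pvColW, PySem.List.length_pyRange_one]
  have hbounds := pvGalaxies_bounds grid hrect
  have houter : ∀ (tot : Int), ∀ ig ∈ PySem.List.enumerate (pvGalaxies grid),
      (PySem.List.slice (pvGalaxies grid) none (some ig.1)).foldl (fun total other =>
        let yp := if ig.2.1 > other.1 then (other.1, ig.2.1) else (ig.2.1, other.1)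
        let xp := if ig.2.2 > other.2 then (other.2, ig.2.2) else (ig.2.2, other.2)
        let total := (PySem.List.pyRange yp.1 yp.2 1).foldl
          (fun t row => t + (if (((PySem.List.enumerate grid).filter (fun yr =>
            yr.2.all (fun c => c == '.'))).map (fun yr => yr.1)).contains row then expand else 1)) total
        (PySem.List.pyRange xp.1 xp.2 1).foldl
          (fun t col => t + (if ((PySem.List.pyRange 0 ((grid.headD []).length : Int) 1).filter (fun x =>
            grid.all (fun row => PySem.List.pyGetD row x '.' == '.'))).contains col then expand else 1)) total)
        tot
      = ((pvGalaxies grid).take ig.1.toNat).foldl (fun t o =>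
          t + ((fun g o => pvF (fun v => PySem.List.pyGetD (pvPrefix (pvRowW grid expand)) v 0) g.1 o.1
              + pvF (fun v => PySem.List.pyGetD (pvPrefix (pvColW grid expand)) v 0) g.2 o.2) ig.2 o)) tot := by
    intro tot ig hig
    obtain ⟨k, hk, rfl⟩ := (PySem.List.mem_enumerate_iff _ 0 _).mp hig
    rw [PySem.List.slice_to (pvGalaxies grid)
      (b := ((0 : Int) + (k : Int), (pvGalaxies grid)[k]).1) (by simp)]
    apply PySem.List.foldl_congr_mem
    intro t o ho
    have hgmem : (pvGalaxies grid)[k] ∈ pvGalaxies grid := List.getElem_mem hk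
    have homem : o ∈ pvGalaxies grid := List.mem_of_mem_take ho
    obtain ⟨hg1, hg2, hg3, hg4⟩ := hbounds _ hgmem
    obtain ⟨ho1, ho2, ho3, ho4⟩ := hbounds _ homem
    simp only [pvMinMax]
    have hrow : ∀ (t' : Int), (PySem.List.pyRange (min (0 + ↑k, (pvGalaxies grid)[k]).2.1 o.1)
          (max (0 + ↑k, (pvGalaxies grid)[k]).2.1 o.1) 1).foldl
        (fun t row => t + (if (((PySem.List.enumerate grid).filter (fun yr =>
            yr.2.all (fun c => c == '.'))).map (fun yr => yr.1)).contains row then expand else 1)) t'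
        = t' + ((List.take (max (pvGalaxies grid)[k].1 o.1).toNat (pvRowW grid expand)).sum
              - (List.take (min (pvGalaxies grid)[k].1 o.1).toNat (pvRowW grid expand)).sum) := by
      intro t'
      simp only
      rw [PySem.List.foldl_congr_mem _ _
        (fun t row => t + PySem.List.pyGetD (pvRowW grid expand) row 0) _ ?hcong]
      case hcong =>
        intro t'' row hrow
        obtain ⟨hlo, hhi⟩ := PySem.List.mem_pyRange_one.mp hrow
        rw [pvRowBridge grid expand row (by omega) (by omega)]
      rw [pvRange_fold_sum (pvRowW grid expand) _ (by omega) _ (by omega)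
        (by rw [hlenr]; omega) t']
    have hcol : ∀ (t' : Int), (PySem.List.pyRange (min (0 + ↑k, (pvGalaxies grid)[k]).2.2 o.2)
          (max (0 + ↑k, (pvGalaxies grid)[k]).2.2 o.2) 1).foldl
        (fun t col => t + (if ((PySem.List.pyRange 0 ((grid.headD []).length : Int) 1).filter (fun x =>
            grid.all (fun row => PySem.List.pyGetD row x '.' == '.'))).contains col then expand else 1)) t'
        = t' + ((List.take (max (pvGalaxies grid)[k].2 o.2).toNat (pvColW grid expand)).sum
              - (List.take (min (pvGalaxies grid)[k].2 o.2).toNat (pvColW grid expand)).sum) := by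
      intro t'
      simp only
      rw [PySem.List.foldl_congr_mem _ _
        (fun t col => t + PySem.List.pyGetD (pvColW grid expand) col 0) _ ?hcong]
      case hcong =>
        intro t'' col hcol
        obtain ⟨hlo, hhi⟩ := PySem.List.mem_pyRange_one.mp hcol
        rw [pvColBridge grid expand col (by omega) (by omega)]
      rw [pvRange_fold_sum (pvColW grid expand) _ (by omega) _ (by omega)
        (by rw [hlenc]; omega) t']
    simp only [hrow, hcol]
    have hy : pvF (fun v => PySem.List.pyGetD (pvPrefix (pvRowW grid expand)) v 0)
        (pvGalaxies grid)[k].1 o.1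
        = (List.take (max (pvGalaxies grid)[k].1 o.1).toNat (pvRowW grid expand)).sum
          - (List.take (min (pvGalaxies grid)[k].1 o.1).toNat (pvRowW grid expand)).sum := by
      simp only [pvF]
      rw [pvPrefix_getD _ _ (by omega) (by rw [hlenr]; omega),
          pvPrefix_getD _ _ (by omega) (by rw [hlenr]; omega)]
    have hx : pvF (fun v => PySem.List.pyGetD (pvPrefix (pvColW grid expand)) v 0)
        (pvGalaxies grid)[k].2 o.2
        = (List.take (max (pvGalaxies grid)[k].2 o.2).toNat (pvColW grid expand)).sum
          - (List.take (min (pvGalaxies grid)[k].2 o.2).toNat (pvColW grid expand)).sum := by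
      simp only [pvF]
      rw [pvPrefix_getD _ _ (by omega) (by rw [hlenc]; omega),
          pvPrefix_getD _ _ (by omega) (by rw [hlenc]; omega)]
    simp only [hy, hx]
    ring
  rw [PySem.List.foldl_congr_mem _ _ _ _ houter]
  beta_reduce
  have ha := pvAfold (fun g o =>
      pvF (fun v => PySem.List.pyGetD (pvPrefix (pvRowW grid expand)) v 0) g.1 o.1
      + pvF (fun v => PySem.List.pyGetD (pvPrefix (pvColW grid expand)) v 0) g.2 o.2)
    (fun a b => by
      beta_reduce
      rw [pvF_symm, pvF_symm (fun v => PySem.List.pyGetD (pvPrefix (pvColW grid expand)) v 0)])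
    (pvGalaxies grid)
  beta_reduce at ha
  rw [ha]
  have hadd := pairG_add
    (fun a b => pvF (fun v => PySem.List.pyGetD (pvPrefix (pvRowW grid expand)) v 0) a.1 b.1)
    (fun a b => pvF (fun v => PySem.List.pyGetD (pvPrefix (pvColW grid expand)) v 0) a.2 b.2)
    (pvGalaxies grid)
  beta_reduce at hadd
  rw [hadd]
  have hc1 := pairG_comp (fun p : Int × Int => p.1)
    (pvF (fun v => PySem.List.pyGetD (pvPrefix (pvRowW grid expand)) v 0)) (pvGalaxies grid)
  have hc2 := pairG_comp (fun p : Int × Int => p.2)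
    (pvF (fun v => PySem.List.pyGetD (pvPrefix (pvColW grid expand)) v 0)) (pvGalaxies grid)
  beta_reduce at hc1 hc2
  rw [hc1, hc2]
  rw [pvAxisTotal_eq, pvAxisTotal_eq]

-- ===== VERDICT (by name: the statement is the Claim_ definition above) =====
theorem get_sum_of_shortest_ranges_spec : Claim_equal_get_sum_of_shortest_ranges := by
  intro input expand _ hpre
  unfold Spec_get_sum_of_shortest_ranges
  simp only [Pre_get_sum_of_shortest_ranges] at hpre
  obtain ⟨hne, hrect⟩ := hpre
  simp only [get_sum_of_shortest_ranges, get_sum_of_shortest_ranges_alt]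
  rw [pvPairs_eq (PySem.Chars.splitlines (PySem.Chars.strip input.toList))]
  have hc := pvCore (PySem.Chars.splitlines (PySem.Chars.strip input.toList)) expand hrect
  simp only [pvGalaxies, pvRowW, pvColW] at hc
  exact hc
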